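-- pv_equiv track=rewrite | github.com/infoai1/docPro | app.py | split_into_chapters
-- ===== SOURCE A (Python) =====
-- def split_into_chapters(text):
--     lines = text.split("\n")
--     chapters = []
--     current_chapter = {"title": "Introduction", "text": ""}
--
--     for line in lines:
--         if len(line.strip()) > 0 and line.strip().isupper():
--             if current_chapter["text"].strip():
--                 chapters.append(current_chapter)
--             current_chapter = {"title": line.strip(), "text": ""}
--         else:
--             current_chapter["text"] += line + " "
--
--     if current_chapter["text"].strip():
--         chapters.append(current_chapter)
--
--     return chapters
-- ===== SOURCE B (Python) =====
-- def split_into_chapters(text):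
--     lines = text.split("\n")
--     # Pass 1 (scan right-to-left): cut the line list into (title, body_lines)
--     # segments at heading lines; the leading segment gets the default title.
--     segs = []   # completed segments, collected back to front
--     body = []   # body lines of the segment being assembled, in reverse order
--     for line in reversed(lines):
--         s = line.strip()
--         if s and s.isupper():
--             segs.append((s, body[::-1]))
--             body = []
--         else:
--             body.append(line)
--     segs.append(("Introduction", body[::-1]))
--     segs.reverse()
--     # Pass 2: render each segment, dropping those whose text is blank.
--     chapters = []
--     for title, body_lines in segs:
--         txt = "".join(l + " " for l in body_lines)
--         if txt.strip():
--             chapters.append({"title": title, "text": txt})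
--     return chapters
-- ===== Notes on version B (the rewrite author's own statement) =====
-- stated objective: alternative
-- what changed: Replaces A's single left-to-right pass with a mutating chapter accumulator (string += per line, flush at each heading) by a two-phase shape: a right-to-left scan that cuts the line list into (title, body-lines) segments at heading boundaries, then a separate render pass that joins each body and drops blank chapters.
import Mathlib
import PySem

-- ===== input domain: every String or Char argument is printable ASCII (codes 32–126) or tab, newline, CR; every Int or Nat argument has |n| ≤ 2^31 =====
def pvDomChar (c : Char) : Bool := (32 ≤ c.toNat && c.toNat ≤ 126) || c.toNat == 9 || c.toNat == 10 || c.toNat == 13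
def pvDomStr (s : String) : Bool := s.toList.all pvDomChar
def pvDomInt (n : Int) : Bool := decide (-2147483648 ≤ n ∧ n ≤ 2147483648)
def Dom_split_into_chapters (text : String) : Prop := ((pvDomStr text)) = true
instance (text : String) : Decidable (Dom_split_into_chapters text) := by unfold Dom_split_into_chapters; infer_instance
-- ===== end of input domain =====

-- B replaces A's one-pass string accumulator with a segment-then-render decomposition
-- (right-to-left boundary scan, then a join/filter pass); same cost, alternative structure.

-- shared helper: 'len(line.strip()) > 0 and line.strip().isupper()'.
-- str.isupper() is ported by hand (exact on the ASCII domain, where the cased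
-- characters are exactly the letters): some cased char and no lowercase char.
def pvIsHeading (line : List Char) : Bool :=
  let s := PySem.Chars.strip line
  !s.isEmpty && s.any (fun c => PySem.Str.isupper c || PySem.Str.islower c)
    && s.all (fun c => !PySem.Str.islower c)

-- a chapter dict {"title": t, "text": txt}
def pvMkCh (t txt : List Char) : List (String × String) :=
  [("title", String.mk t), ("text", String.mk txt)]

-- ===== PORT A =====
-- A's loop body on state (chapters, title, current_text)
def pvStepA (st : List (List (String × String)) × List Char × List Char)
    (line : List Char) : List (List (String × String)) × List Char × List Char :=
  if pvIsHeading line then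
    (if (PySem.Chars.strip st.2.2).isEmpty then st.1 else st.1 ++ [pvMkCh st.2.1 st.2.2],
     PySem.Chars.strip line, [])
  else
    (st.1, st.2.1, st.2.2 ++ line ++ [' '])

def split_into_chapters (text : String) : List (List (String × String)) :=
  let lines := PySem.Chars.splitOn text.toList ['\n']
  let st := lines.foldl pvStepA ([], "Introduction".toList, [])
  if (PySem.Chars.strip st.2.2).isEmpty then st.1 else st.1 ++ [pvMkCh st.2.1 st.2.2]

-- ===== PORT B =====
-- B's pass-1 loop body on state (segs, reversed body lines)
def pvStepB (st : List (List Char × List (List Char)) × List (List Char))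
    (line : List Char) : List (List Char × List (List Char)) × List (List Char) :=
  if pvIsHeading line then (st.1 ++ [(PySem.Chars.strip line, st.2.reverse)], [])
  else (st.1, st.2 ++ [line])

-- B's pass-2 body: txt = "".join(l + " " for l in body)  ("".join = concatenation);
-- returns the chapter unless txt is blank
def pvRender? (seg : List Char × List (List Char)) : Option (List (String × String)) :=
  let txt := (seg.2.map (fun l => l ++ [' '])).flatten
  if (PySem.Chars.strip txt).isEmpty then none else some (pvMkCh seg.1 txt)

def split_into_chapters_alt (text : String) : List (List (String × String)) :=
  let lines := PySem.Chars.splitOn text.toList ['\n']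
  let p := lines.reverse.foldl pvStepB ([], [])
  let segs := (p.1 ++ [("Introduction".toList, p.2.reverse)]).reverse
  segs.filterMap pvRender?

-- ===== PRECONDITION & SPEC =====
def Spec_split_into_chapters (text : String) (out : List (List (String × String))) : Prop := out = split_into_chapters_alt text
instance (text : String) (out : List (List (String × String))) : Decidable (Spec_split_into_chapters text out) := by unfold Spec_split_into_chapters; infer_instance

-- ===== CLAIM (what is proved, stated in full; the proofs are below) =====
def Claim_equal_split_into_chapters : Prop := ∀ (text : String), Dom_split_into_chapters text → Spec_split_into_chapters text (split_into_chapters text)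

-- ===== LEMMAS AND PROOFS =====

-- the chapter produced by a flush of (title, text), as a 0/1-element list
def chOf (t cur : List Char) : List (List (String × String)) :=
  if (PySem.Chars.strip cur).isEmpty then [] else [pvMkCh t cur]

-- recursive characterisation of A's remaining output from state (t, cur)
def chFrom (t cur : List Char) : List (List Char) → List (List (String × String))
  | [] => chOf t cur
  | l :: ls =>
    if pvIsHeading l then chOf t cur ++ chFrom (PySem.Chars.strip l) [] ls
    else chFrom t (cur ++ l ++ [' ']) ls

-- structural (foldr-style) segmentation: (completed segments, leading body)
def segR : List (List Char) → List (List Char × List (List Char)) × List (List Char)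
  | [] => ([], [])
  | l :: ls =>
    let p := segR ls
    if pvIsHeading l then ((PySem.Chars.strip l, p.2) :: p.1, []) else (p.1, l :: p.2)

def joinB (b : List (List Char)) : List Char := (b.map (fun l => l ++ [' '])).flatten

theorem lemA (lines : List (List Char)) :
    ∀ (acc : List (List (String × String))) (t cur : List Char),
    (if (PySem.Chars.strip (lines.foldl pvStepA (acc, t, cur)).2.2).isEmpty
       then (lines.foldl pvStepA (acc, t, cur)).1
       else (lines.foldl pvStepA (acc, t, cur)).1
         ++ [pvMkCh (lines.foldl pvStepA (acc, t, cur)).2.1 (lines.foldl pvStepA (acc, t, cur)).2.2])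
      = acc ++ chFrom t cur lines := by
  induction lines with
  | nil =>
    intro acc t cur
    simp only [List.foldl_nil, chFrom, chOf]
    split_ifs <;> simp
  | cons l ls ih =>
    intro acc t cur
    cases h : pvIsHeading l with
    | true =>
      simp only [List.foldl_cons, chFrom, pvStepA, h, if_true, ih, chOf]
      split_ifs <;> simp
    | false =>
      simp only [List.foldl_cons, chFrom, pvStepA, h, Bool.false_eq_true, if_false, ih]

theorem lemB1 (lines : List (List Char)) :
    lines.reverse.foldl pvStepB ([], []) = ((segR lines).1.reverse, (segR lines).2.reverse) := by
  rw [List.foldl_reverse]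
  induction lines with
  | nil => simp [segR]
  | cons l ls ih =>
    rw [List.foldr_cons, ih]
    cases h : pvIsHeading l with
    | true => simp [segR, pvStepB, h]
    | false => simp [segR, pvStepB, h]

theorem renderCons (s : List Char × List (List Char)) (rest : List (List Char × List (List Char))) :
    List.filterMap pvRender? (s :: rest) = chOf s.1 (joinB s.2) ++ rest.filterMap pvRender? := by
  simp only [List.filterMap_cons, pvRender?, chOf, joinB]
  split_ifs <;> simp_all

theorem lemB2 (lines : List (List Char)) :
    ∀ (t cur : List Char),
    chFrom t cur lines
      = chOf t (cur ++ joinB (segR lines).2) ++ ((segR lines).1).filterMap pvRender? := by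
  induction lines with
  | nil => intro t cur; simp [chFrom, segR, joinB]
  | cons l ls ih =>
    intro t cur
    cases h : pvIsHeading l with
    | true =>
      simp only [chFrom, segR, h, if_true, ih, renderCons, joinB, List.map_nil,
        List.flatten_nil, List.append_nil, List.append_assoc, List.nil_append]
    | false =>
      simp only [chFrom, segR, h, Bool.false_eq_true, if_false, ih, joinB,
        List.map_cons, List.flatten_cons, List.append_assoc]

-- ===== VERDICT (by name: the statement is the Claim_ definition above) =====
theorem split_into_chapters_spec : Claim_equal_split_into_chapters := by
  intro text _
  show split_into_chapters text = split_into_chapters_alt text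
  simp only [split_into_chapters, split_into_chapters_alt]
  rw [lemA, lemB1]
  simp only [List.reverse_append, List.reverse_reverse, List.reverse_cons,
    List.reverse_nil, List.nil_append, List.singleton_append]
  rw [lemB2, renderCons]
  simp
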